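-- pv_equiv track=rewrite | github.com/cyberneticbookshelf-stack/cyberneticsNLP | src/check_stale_vars.py | replace_lda_base
-- ===== SOURCE A (Python) =====
-- def replace_lda_base(text, new_names):
--     """Replace the _LDA_BASE = [...] block in source text using line-scanning.
--     Returns (new_text: str, changed: bool)."""
--     lines = text.splitlines(keepends=True)
--     out = []
--     i = 0
--     replaced = False
--     while i < len(lines):
--         line = lines[i]
--         if line.rstrip() == '_LDA_BASE = [':
--             # Write new block
--             out.append('_LDA_BASE = [\n')
--             for name in new_names:
--                 out.append(f"    '{name}',\n")
--             out.append(']\n')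
--             # Skip old block (find closing ])
--             i += 1
--             while i < len(lines):
--                 if lines[i].rstrip() == ']':
--                     i += 1
--                     break
--                 i += 1
--             replaced = True
--         else:
--             out.append(line)
--             i += 1
--     return ''.join(out), replaced
-- ===== SOURCE B (Python) =====
-- def replace_lda_base(text, new_names):
--     """Two-pass rewrite: first collect the (start, end) line ranges of every
--     _LDA_BASE block, then rebuild the output from slices between the ranges."""
--     lines = text.splitlines(keepends=True)
--     n = len(lines)
--     ranges = []
--     i = 0
--     while i < n:
--         if lines[i].rstrip() == '_LDA_BASE = [':
--             j = i + 1
--             while j < n and lines[j].rstrip() != ']':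
--                 j += 1
--             end = j + 1 if j < n else n
--             ranges.append((i, end))
--             i = end
--         else:
--             i += 1
--     block = ['_LDA_BASE = [\n'] + ["    '%s',\n" % name for name in new_names] + [']\n']
--     out = []
--     prev = 0
--     for start, end in ranges:
--         out.extend(lines[prev:start])
--         out.extend(block)
--         prev = end
--     out.extend(lines[prev:])
--     return ''.join(out), bool(ranges)
-- ===== Notes on version B (the rewrite author's own statement) =====
-- stated objective: alternative
-- what changed: Replaces A's single interleaved scan (emit-as-you-go with an inner skip loop and an output accumulator) by two passes: pass one collects the (start,end) line ranges of every marker block, pass two rebuilds the text from slices between the ranges plus the generated block.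
import Mathlib
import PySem

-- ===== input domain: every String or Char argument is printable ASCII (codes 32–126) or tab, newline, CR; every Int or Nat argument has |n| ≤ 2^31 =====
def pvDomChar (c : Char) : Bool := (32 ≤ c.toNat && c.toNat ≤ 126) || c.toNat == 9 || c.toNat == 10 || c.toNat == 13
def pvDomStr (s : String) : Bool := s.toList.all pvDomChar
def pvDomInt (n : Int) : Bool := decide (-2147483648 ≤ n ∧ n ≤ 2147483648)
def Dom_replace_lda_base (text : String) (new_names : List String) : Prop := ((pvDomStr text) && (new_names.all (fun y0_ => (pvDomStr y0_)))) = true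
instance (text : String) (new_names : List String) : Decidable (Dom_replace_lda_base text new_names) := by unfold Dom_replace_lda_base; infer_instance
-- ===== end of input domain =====

-- B reorganises A's single interleaved scan into two passes (collect block ranges, then
-- rebuild from slices); same cost, alternative decomposition — return values proved equal.

-- ===== PORT A =====
-- shared helper: text.splitlines(keepends=True); exact on the Dom charset, where the
-- only line breaks are '\n', '\r' and '\r\n' (ported by hand: PySem has no keepends form)
def pvBreakLine : List Char → List Char × List Char
  | [] => ([], [])
  | c :: rest =>
    if c = '\n' then ([c], rest)
    else if c = '\r' then
      match rest with
      | '\n' :: rest' => (['\r', '\n'], rest')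
      | _ => (['\r'], rest)
    else
      ((c :: (pvBreakLine rest).1), (pvBreakLine rest).2)

theorem pvBreakLine_snd_le (cs : List Char) : (pvBreakLine cs).2.length ≤ cs.length := by
  induction cs with
  | nil => simp [pvBreakLine]
  | cons c rest ih =>
    simp only [pvBreakLine]
    split_ifs with h1 h2
    · simp
    · cases rest with
      | nil => simp
      | cons d rest' =>
        cases hd : d == '\n' with
        | true => simp_all; omega
        | false =>
          have : d ≠ '\n' := by simpa using hd
          cases rest' <;> simp_all
    · simpa using Nat.le_succ_of_le ih

theorem pvBreakLine_snd_lt (c : Char) (rest : List Char) :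
    (pvBreakLine (c :: rest)).2.length < (c :: rest).length := by
  simp only [pvBreakLine]
  split_ifs with h1 h2
  · simp
  · cases rest with
    | nil => simp
    | cons d rest' =>
      cases hd : d == '\n' with
      | true => simp_all
      | false =>
        have : d ≠ '\n' := by simpa using hd
        cases rest' <;> simp_all
  · have := pvBreakLine_snd_le rest
    simpa using Nat.lt_succ_of_le this

def pvSplitKE : List Char → List String
  | [] => []
  | c :: rest =>
    String.ofList (pvBreakLine (c :: rest)).1 :: pvSplitKE (pvBreakLine (c :: rest)).2
termination_by cs => cs.length
decreasing_by exact pvBreakLine_snd_lt c rest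

-- inner while loop: skip lines until (and including) the first one whose rstrip() is ']'
def pvSkipA : List String → List String
  | [] => []
  | l :: ls => if PySem.Str.rstrip l == "]" then ls else pvSkipA ls

theorem pvSkipA_le (ls : List String) : (pvSkipA ls).length ≤ ls.length := by
  induction ls with
  | nil => simp [pvSkipA]
  | cons l ls ih =>
    simp only [pvSkipA]
    split_ifs
    · simp
    · exact Nat.le_succ_of_le ih

-- A's main while loop: out-accumulator, replaced flag, remaining lines
def pvGoA (new_names : List String) (out : List String) (rep : Bool) : List String → List String × Bool
  | [] => (out, rep)
  | l :: ls =>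
    if PySem.Str.rstrip l == "_LDA_BASE = [" then
      pvGoA new_names
        ((new_names.foldl (fun o n => o ++ ["    '" ++ n ++ "',\n"]) (out ++ ["_LDA_BASE = [\n"])) ++ ["]\n"])
        true (pvSkipA ls)
    else
      pvGoA new_names (out ++ [l]) rep ls
termination_by ls => ls.length
decreasing_by
  · exact Nat.lt_succ_of_le (pvSkipA_le ls)
  · simp

def replace_lda_base (text : String) (new_names : List String) : String × Bool :=
  let lines := pvSplitKE text.toList
  let r := pvGoA new_names [] false lines
  (PySem.Str.join "" r.1, r.2)

-- ===== PORT B =====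
-- pass-one inner loop: first index j in [j, n) whose line rstrips to ']', else n (or j if j > n)
def pvFindClose (lines : List String) (n j : Nat) : Nat :=
  if j < n then
    if PySem.Str.rstrip (lines.getD j "") == "]" then j
    else pvFindClose lines n (j + 1)
  else j
termination_by n - j

theorem pvFindClose_ge (lines : List String) (n j : Nat) : j ≤ pvFindClose lines n j := by
  fun_induction pvFindClose with
  | case1 => omega
  | case2 _ _ _ ih => omega
  | case3 => omega

def pvFindRanges (lines : List String) (n i : Nat) : List (Nat × Nat) :=
  if i < n then
    if PySem.Str.rstrip (lines.getD i "") == "_LDA_BASE = [" then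
      let j := pvFindClose lines n (i + 1)
      let e := if j < n then j + 1 else n
      (i, e) :: pvFindRanges lines n e
    else pvFindRanges lines n (i + 1)
  else []
termination_by n - i
decreasing_by
  · have := pvFindClose_ge lines n (i + 1)
    split <;> omega
  · omega

def pvBlock (new_names : List String) : List String :=
  ["_LDA_BASE = [\n"] ++ new_names.map (fun name => "    '" ++ name ++ "',\n") ++ ["]\n"]

def replace_lda_base_alt (text : String) (new_names : List String) : String × Bool :=
  let lines := pvSplitKE text.toList
  let n := lines.length
  let ranges := pvFindRanges lines n 0
  let block := pvBlock new_names
  let op := ranges.foldl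
    (fun (op : List String × Nat) r =>
      (op.1 ++ PySem.List.slice lines (some (op.2 : Int)) (some (r.1 : Int)) ++ block, r.2))
    ([], 0)
  let out := op.1 ++ PySem.List.slice lines (some (op.2 : Int)) none
  (PySem.Str.join "" out, !ranges.isEmpty)

-- ===== PRECONDITION & SPEC =====
def Spec_replace_lda_base (text : String) (new_names : List String) (out : String × Bool) : Prop := out = replace_lda_base_alt text new_names
instance (text : String) (new_names : List String) (out : String × Bool) : Decidable (Spec_replace_lda_base text new_names out) := by unfold Spec_replace_lda_base; infer_instance

-- ===== CLAIM (what is proved, stated in full; the proofs are below) =====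
def Claim_equal_replace_lda_base : Prop := ∀ (text : String) (new_names : List String), Dom_replace_lda_base text new_names → Spec_replace_lda_base text new_names (replace_lda_base text new_names)

-- ===== LEMMAS AND PROOFS =====

-- accumulator-free version of A's scan
def pvGA (nn : List String) : List String → List String × Bool
  | [] => ([], false)
  | l :: ls =>
    if PySem.Str.rstrip l == "_LDA_BASE = [" then
      (pvBlock nn ++ (pvGA nn (pvSkipA ls)).1, true)
    else
      (l :: (pvGA nn ls).1, (pvGA nn ls).2)
termination_by ls => ls.length
decreasing_by
  · exact Nat.lt_succ_of_le (pvSkipA_le ls)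
  · simp

theorem pvGA_nil (nn : List String) : pvGA nn [] = ([], false) := by
  rw [pvGA]

theorem pvGA_cons (nn : List String) (l : String) (ls : List String) :
    pvGA nn (l :: ls)
      = if PySem.Str.rstrip l == "_LDA_BASE = [" then
          (pvBlock nn ++ (pvGA nn (pvSkipA ls)).1, true)
        else (l :: (pvGA nn ls).1, (pvGA nn ls).2) := by
  conv_lhs => rw [pvGA.eq_def]

theorem pv_foldl_names (nn out : List String) :
    nn.foldl (fun o n => o ++ ["    '" ++ n ++ "',\n"]) out
      = out ++ nn.map (fun n => "    '" ++ n ++ "',\n") := by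
  induction nn generalizing out with
  | nil => simp
  | cons n nn ih => simp [ih, List.append_assoc]

theorem pvGoA_eq (nn : List String) (ls : List String) :
    ∀ out rep, pvGoA nn out rep ls = (out ++ (pvGA nn ls).1, rep || (pvGA nn ls).2) := by
  fun_induction pvGA nn ls with
  | case1 => intro out rep; simp [pvGoA]
  | case2 l ls h ih =>
    intro out rep
    rw [pvGoA, if_pos h, ih, pv_foldl_names]
    simp [pvBlock, List.append_assoc]
  | case3 l ls h ih =>
    intro out rep
    rw [pvGoA, if_neg h, ih]
    simp [List.append_assoc]

-- skip-to-closer on a suffix equals dropping to pass-one's computed end index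
theorem pvSkip_drop (lines : List String) (j : Nat) (hj : j ≤ lines.length) :
    pvSkipA (lines.drop j)
      = lines.drop (if pvFindClose lines lines.length j < lines.length
                    then pvFindClose lines lines.length j + 1 else lines.length) := by
  fun_induction pvFindClose lines lines.length j with
  | case1 j h hc =>
    rw [List.drop_eq_getElem_cons h, pvSkipA]
    rw [List.getD_eq_getElem?_getD, List.getElem?_eq_getElem h] at hc
    simp only [Option.getD_some] at hc
    rw [if_pos hc, if_pos h]
  | case2 j h hc ih =>
    rw [List.drop_eq_getElem_cons h, pvSkipA]
    rw [List.getD_eq_getElem?_getD, List.getElem?_eq_getElem h] at hc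
    simp only [Option.getD_some] at hc
    rw [if_neg hc]
    exact ih (by omega)
  | case3 j h =>
    have hjn : j = lines.length := by omega
    subst hjn
    simp [pvSkipA, List.drop_length]

theorem pvFindClose_le (lines : List String) (n j : Nat) (hj : j ≤ n) :
    pvFindClose lines n j ≤ n := by
  fun_induction pvFindClose lines n j with
  | case1 _ h _ => omega
  | case2 _ h _ ih => exact ih (by omega)
  | case3 => omega

theorem pvFindRanges_start (lines : List String) (n i : Nat) :
    ∀ p ∈ pvFindRanges lines n i, i ≤ p.1 := by
  fun_induction pvFindRanges lines n i with
  | case1 i h hm j e ih =>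
    intro p hp
    rw [List.mem_cons] at hp
    rcases hp with rfl | hp
    · simp
    · have hval : e = if j < n then j + 1 else n := rfl
      have hj : i + 1 ≤ j := pvFindClose_ge lines n (i + 1)
      have hep := ih p hp
      split at hval <;> omega
  | case2 i h hm ih =>
    intro p hp
    have := ih p hp
    omega
  | case3 => intro p hp; simp at hp

-- pass-two walk over the ranges (recursive form of B's rebuild loop)
def pvWalk (lines block : List String) : Nat → List (Nat × Nat) → List String
  | prev, [] => lines.drop prev
  | prev, (s, e) :: rs => (lines.drop prev).take (s - prev) ++ block ++ pvWalk lines block e rs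

theorem pv_fold_walk (lines block : List String) :
    ∀ (ranges : List (Nat × Nat)) (out : List String) (prev : Nat),
      (ranges.foldl
        (fun (op : List String × Nat) r =>
          (op.1 ++ PySem.List.slice lines (some (op.2 : Int)) (some (r.1 : Int)) ++ block, r.2))
        (out, prev)).1
        ++ PySem.List.slice lines
            (some (((ranges.foldl
              (fun (op : List String × Nat) r =>
                (op.1 ++ PySem.List.slice lines (some (op.2 : Int)) (some (r.1 : Int)) ++ block, r.2))
              (out, prev)).2 : Nat) : Int)) none
      = out ++ pvWalk lines block prev ranges := by
  intro ranges
  induction ranges with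
  | nil =>
    intro out prev
    simp [pvWalk, PySem.List.slice_from_natCast]
  | cons r rs ih =>
    intro out prev
    obtain ⟨s, e⟩ := r
    rw [List.foldl_cons, ih]
    simp only [pvWalk]
    rw [PySem.List.slice_natCast]
    ac_rfl

theorem pvWalk_cons (lines block : List String) (i : Nat) (h : i < lines.length)
    (rs : List (Nat × Nat)) (hs : ∀ p ∈ rs, i + 1 ≤ p.1) :
    pvWalk lines block i rs = lines[i] :: pvWalk lines block (i + 1) rs := by
  cases rs with
  | nil =>
    simp only [pvWalk]
    exact List.drop_eq_getElem_cons h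
  | cons r rs =>
    obtain ⟨s, e⟩ := r
    have hsi : i + 1 ≤ s := hs (s, e) (by simp)
    simp only [pvWalk]
    rw [List.drop_eq_getElem_cons h]
    have : s - i = (s - (i + 1)) + 1 := by omega
    rw [this, List.take_succ_cons]
    simp

-- main invariant: walking the ranges from i rebuilds exactly what A's scan emits on drop i
theorem pvMain (lines nn : List String) (i : Nat) (hi : i ≤ lines.length) :
    pvWalk lines (pvBlock nn) i (pvFindRanges lines lines.length i)
        = (pvGA nn (lines.drop i)).1
    ∧ (pvGA nn (lines.drop i)).2 = !(pvFindRanges lines lines.length i).isEmpty := by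
  fun_induction pvFindRanges lines lines.length i with
  | case1 i h hm j e ih =>
    have hget : lines.getD i "" = lines[i] := by
      rw [List.getD_eq_getElem?_getD, List.getElem?_eq_getElem h]; rfl
    rw [hget] at hm
    have hdrop := List.drop_eq_getElem_cons h (l := lines)
    have hskip := pvSkip_drop lines (i + 1) (by omega)
    have hval : e = if pvFindClose lines lines.length (i + 1) < lines.length
        then pvFindClose lines lines.length (i + 1) + 1 else lines.length := rfl
    rw [← hval] at hskip
    have he : e ≤ lines.length := by
      have := pvFindClose_le lines lines.length (i + 1) (by omega)
      split at hval <;> omega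
    obtain ⟨ih1, ih2⟩ := ih he
    constructor
    · simp only [pvWalk, Nat.sub_self, List.take_zero, List.nil_append]
      rw [hdrop, pvGA_cons, if_pos hm, hskip, ih1]
    · rw [hdrop, pvGA_cons, if_pos hm]
      simp
  | case2 i h hm ih =>
    have hget : lines.getD i "" = lines[i] := by
      rw [List.getD_eq_getElem?_getD, List.getElem?_eq_getElem h]; rfl
    rw [hget] at hm
    have hdrop := List.drop_eq_getElem_cons h (l := lines)
    obtain ⟨ih1, ih2⟩ := ih (by omega)
    constructor
    · rw [pvWalk_cons lines (pvBlock nn) i h _ (pvFindRanges_start lines lines.length (i + 1)), hdrop,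
        pvGA_cons, if_neg hm, ih1]
    · rw [hdrop, pvGA_cons, if_neg hm, ih2]
  | case3 i h =>
    have : i = lines.length := by omega
    subst this
    simp [pvWalk, pvGA_nil, List.drop_length]

-- ===== VERDICT (by name: the statement is the Claim_ definition above) =====
theorem pvAB (L nn : List String) :
    (PySem.Str.join "" (pvGoA nn [] false L).1, (pvGoA nn [] false L).2)
      = (PySem.Str.join ""
          (((pvFindRanges L L.length 0).foldl
              (fun (op : List String × Nat) r =>
                (op.1 ++ PySem.List.slice L (some (op.2 : Int)) (some (r.1 : Int)) ++ pvBlock nn, r.2))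
              ([], 0)).1
            ++ PySem.List.slice L
                (some ((((pvFindRanges L L.length 0).foldl
                    (fun (op : List String × Nat) r =>
                      (op.1 ++ PySem.List.slice L (some (op.2 : Int)) (some (r.1 : Int)) ++ pvBlock nn, r.2))
                    ([], 0)).2 : Nat) : Int)) none),
          !(pvFindRanges L L.length 0).isEmpty) := by
  obtain ⟨h1, h2⟩ := pvMain L nn 0 (by omega)
  rw [pvGoA_eq, pv_fold_walk]
  simp only [List.nil_append, Bool.false_or, List.drop_zero] at h1 h2 ⊢
  rw [h1, h2]

-- ===== VERDICT (by name: the statement is the Claim_ definition above) =====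
theorem replace_lda_base_spec : Claim_equal_replace_lda_base := by
  intro text nn _
  exact pvAB (pvSplitKE text.toList) nn
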